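-- pv_equiv track=rewrite | github.com/DignaCouso/dignacouso-www | scripts/generate_ris.py | join_multiline_entries
-- ===== SOURCE A (Python) =====
-- def join_multiline_entries(text):
--     """Join continuation lines into single-line entries.
--
--     Entries are separated by blank lines. Continuation lines start with
--     lowercase or special chars and should be joined to the previous line.
--     """
--     lines = text.split("\n")
--     entries = []
--     current = []
--
--     for line in lines:
--         stripped = line.strip()
--         if not stripped:
--             if current:
--                 entries.append(" ".join(current))
--                 current = []
--         else:
--             current.append(stripped)
--
--     if current:
--         entries.append(" ".join(current))
--
--     return entries
-- ===== SOURCE B (Python) =====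
-- def join_multiline_entries(text):
--     stripped = [l.strip() for l in text.split("\n")]
--     entries = []
--     while stripped:
--         if stripped[0]:
--             k = next((i for i, s in enumerate(stripped) if not s), len(stripped))
--             entries.append(" ".join(stripped[:k]))
--             stripped = stripped[k:]
--         else:
--             stripped = stripped[1:]
--     return entries
-- ===== Notes on version B (the rewrite author's own statement) =====
-- stated objective: alternative
-- what changed: B strips all lines up front and then extracts each entry as a maximal run of non-blank lines by slicing (find the run, join it, drop it), instead of A's single pass over raw lines that maintains an accumulator list flushed at every blank line and once more after the loop.
import Mathlib
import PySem

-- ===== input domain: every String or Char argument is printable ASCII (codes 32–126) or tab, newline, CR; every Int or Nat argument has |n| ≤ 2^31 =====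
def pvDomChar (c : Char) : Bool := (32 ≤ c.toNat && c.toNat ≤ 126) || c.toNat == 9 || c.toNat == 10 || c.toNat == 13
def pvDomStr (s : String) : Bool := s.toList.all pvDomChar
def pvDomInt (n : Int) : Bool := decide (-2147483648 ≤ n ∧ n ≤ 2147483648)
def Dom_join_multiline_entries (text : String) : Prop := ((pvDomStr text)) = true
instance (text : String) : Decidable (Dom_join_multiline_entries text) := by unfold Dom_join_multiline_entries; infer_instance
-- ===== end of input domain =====

-- B extracts each entry as a maximal run of non-blank (stripped) lines by slicing, instead of
-- A's accumulator-with-two-flush-sites loop; alternative decomposition, same O(n) cost.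


-- ===== PORT A =====
-- the for-loop over lines with the 'current' accumulator, plus the final flush
def jmeLoopA : List String → List String → List String
  | [], current => if current ≠ [] then [PySem.Str.join " " current] else []
  | line :: ls, current =>
    let stripped := PySem.Str.strip line
    if stripped = "" then
      (if current ≠ [] then PySem.Str.join " " current :: jmeLoopA ls [] else jmeLoopA ls [])
    else
      jmeLoopA ls (current ++ [stripped])

def join_multiline_entries (text : String) : List String :=
  jmeLoopA ((PySem.Str.split? text "\n").getD []) []  -- split? = some … since sep "\n" ≠ ""

-- ===== PORT B =====
-- used by jmeGroup's termination proof
theorem jme_takeWhile_len_le (l : List String) : (l.takeWhile (· != "")).length ≤ l.length := by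
  induction l with
  | nil => simp
  | cons a t ih => by_cases ha : (a != "") = true <;> simp [ha] <;> omega

-- the while-loop over the pre-stripped list: k = first index of a blank element (else len)
-- = length of the non-blank prefix; emit stripped[:k] joined, continue on stripped[k:]
def jmeGroup : List String → List String
  | [] => []
  | s :: rest =>
    if s != "" then
      let k := ((s :: rest).takeWhile (· != "")).length
      PySem.Str.join " " ((s :: rest).take k) :: jmeGroup ((s :: rest).drop k)
    else
      jmeGroup rest
termination_by l => l.length
decreasing_by
  · simp only [List.length_drop, List.length_cons, List.takeWhile_cons]
    have h := jme_takeWhile_len_le rest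
    simp only [*, if_true, List.length_cons]
    omega
  · simp

def join_multiline_entries_alt (text : String) : List String :=
  let stripped := ((PySem.Str.split? text "\n").getD []).map PySem.Str.strip  -- split? = some … since sep ≠ ""
  jmeGroup stripped

-- ===== PRECONDITION & SPEC =====
def Spec_join_multiline_entries (text : String) (out : List String) : Prop := out = join_multiline_entries_alt text
instance (text : String) (out : List String) : Decidable (Spec_join_multiline_entries text out) := by unfold Spec_join_multiline_entries; infer_instance

-- ===== CLAIM (what is proved, stated in full; the proofs are below) =====
def Claim_equal_join_multiline_entries : Prop := ∀ (text : String), Dom_join_multiline_entries text → Spec_join_multiline_entries text (join_multiline_entries text)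

-- ===== LEMMAS AND PROOFS =====

theorem jmeGroup_nil : jmeGroup [] = [] := by simp [jmeGroup]

theorem jmeGroup_cons_blank (rest : List String) : jmeGroup ("" :: rest) = jmeGroup rest := by
  simp [jmeGroup]

theorem jmeGroup_cons_ne (s : String) (rest : List String) (h : s ≠ "") :
    jmeGroup (s :: rest) =
      PySem.Str.join " " (s :: rest.takeWhile (· != "")) :: jmeGroup (rest.dropWhile (· != "")) := by
  rw [jmeGroup]
  have hb : (s != "") = true := by simpa using h
  simp only [hb, if_true, List.takeWhile_cons, List.length_cons, List.take_succ_cons,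
    List.drop_succ_cons]
  have htake : rest.take (rest.takeWhile (· != "")).length = rest.takeWhile (· != "") :=
    (List.prefix_iff_eq_take.mp (List.takeWhile_prefix _)).symm
  have hdrop : rest.drop (rest.takeWhile (· != "")).length = rest.dropWhile (· != "") := by
    have h2 : List.drop (rest.takeWhile (· != "")).length
        (rest.takeWhile (· != "") ++ rest.dropWhile (· != "")) = rest.dropWhile (· != "") :=
      List.drop_left
    rw [List.takeWhile_append_dropWhile] at h2
    exact h2
  rw [htake, hdrop]

theorem jmeLoopA_eq (ls : List String) : ∀ cur : List String,
    jmeLoopA ls cur =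
      if cur = [] then jmeGroup (ls.map PySem.Str.strip)
      else PySem.Str.join " " (cur ++ (ls.map PySem.Str.strip).takeWhile (· != "")) ::
        jmeGroup ((ls.map PySem.Str.strip).dropWhile (· != "")) := by
  induction ls with
  | nil =>
    intro cur
    by_cases hc : cur = [] <;> simp [jmeLoopA, hc, jmeGroup_nil]
  | cons line ls ih =>
    intro cur
    by_cases hs : PySem.Str.strip line = ""
    · have hb : (PySem.Str.strip line != "") = false := by simpa using hs
      by_cases hc : cur = [] <;>
        simp [jmeLoopA, hs, hc, ih, jmeGroup_cons_blank]
    · have hb : (PySem.Str.strip line != "") = true := by simpa using hs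
      have hne : cur ++ [PySem.Str.strip line] ≠ [] := by simp
      by_cases hc : cur = []
      · simp [jmeLoopA, hs, hc, ih, jmeGroup_cons_ne _ _ hs]
      · simp [jmeLoopA, hs, hc, ih, hb, List.append_assoc]

-- ===== VERDICT (by name: the statement is the Claim_ definition above) =====
theorem join_multiline_entries_spec : Claim_equal_join_multiline_entries := by
  intro text _
  unfold Spec_join_multiline_entries join_multiline_entries join_multiline_entries_alt
  simp [jmeLoopA_eq]
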